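-- pv_equiv track=rewrite | github.com/brianahn96/codingtest | algorithms/largestFibonacciSequence.py | findFibSubset
-- ===== SOURCE A (Python) =====
-- def findFibSubset(arr):
--     # code here
--     max_val = max(arr)
--
--     fib = [0, 1]
--     while fib[-1] < max_val:
--         fib.append(fib[-1] + fib[-2])
--
--     fib_set = set(fib)
--
--     res = [x for x in arr if x in fib_set]
--
--     return res
-- ===== SOURCE B (Python) =====
-- def findFibSubset(arr):
--     # Per-element Fibonacci test: walk the sequence until it reaches x.
--     # No global table, no set, no max() scan.
--     def is_fib(x):
--         if x < 0:
--             return False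
--         a, b = 0, 1
--         while a < x:
--             a, b = b, a + b
--         return a == x
--     return [x for x in arr if is_fib(x)]
-- ===== Notes on version B (the rewrite author's own statement) =====
-- stated objective: simpler
-- what changed: B drops A's max()-bounded global Fibonacci table and set; it tests each element independently by walking the Fibonacci sequence up to that element.
import Mathlib
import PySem

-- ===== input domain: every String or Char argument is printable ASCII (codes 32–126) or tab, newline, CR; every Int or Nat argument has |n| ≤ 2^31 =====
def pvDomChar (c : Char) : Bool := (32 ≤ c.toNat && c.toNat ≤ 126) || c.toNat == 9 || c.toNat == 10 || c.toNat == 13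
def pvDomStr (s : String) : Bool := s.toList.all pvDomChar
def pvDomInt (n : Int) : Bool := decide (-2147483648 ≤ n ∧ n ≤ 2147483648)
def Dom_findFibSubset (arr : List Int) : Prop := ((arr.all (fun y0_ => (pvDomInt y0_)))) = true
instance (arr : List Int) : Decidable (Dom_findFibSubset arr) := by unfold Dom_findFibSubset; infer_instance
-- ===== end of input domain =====

-- B replaces A's max()-bounded Fibonacci table + set by an independent per-element
-- Fibonacci walk (simpler; return value only — neither mutates its argument).

-- ===== PORT A =====
-- the `while fib[-1] < max_val: fib.append(...)` loop, carrying the last two entries (a, b)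
-- and returning the list of appended values; `fuel` only makes the recursion structural and
-- is always sufficient at the call site (3 * maxVal.toNat bounds the loop's step count).
def buildFib (fuel : Nat) (maxVal : Int) (a b : Nat) : List Int :=
  match fuel with
  | 0 => []
  | fuel + 1 =>
      if (b : Int) < maxVal then ((a + b : Nat) : Int) :: buildFib fuel maxVal b (a + b)
      else []

def findFibSubset (arr : List Int) : List Int :=
  match PySem.List.max? arr (fun x => x) with
  | none => []   -- unreachable under Pre_: max(arr) raises ValueError on the empty list
  | some maxVal =>
      let fib : List Int := 0 :: 1 :: buildFib (3 * maxVal.toNat) maxVal 0 1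
      let fibSet := PySem.Set.ofList fib
      arr.filter (fun x => PySem.Set.contains fibSet x)

-- ===== PORT B =====
-- the `while a < x: a, b = b, a + b` loop of is_fib; `fuel` only makes the recursion
-- structural and is always sufficient at the call site (4 * x.toNat bounds the step count).
def fibCheck (fuel : Nat) (x : Int) (a b : Nat) : Bool :=
  match fuel with
  | 0 => decide ((a : Int) = x)
  | fuel + 1 =>
      if (a : Int) < x then fibCheck fuel x b (a + b)
      else decide ((a : Int) = x)

def findFibSubset_alt (arr : List Int) : List Int :=
  arr.filter (fun x => if x < 0 then false else fibCheck (4 * x.toNat) x 0 1)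

-- ===== PRECONDITION & SPEC =====
-- Pre_ excludes only the empty list, on which A raises ValueError (max of empty sequence).
def Pre_findFibSubset (arr : List Int) : Prop := arr ≠ []
instance (arr : List Int) : Decidable (Pre_findFibSubset arr) := by unfold Pre_findFibSubset; infer_instance
def pvWitness_findFibSubset : List Int := [0, 1, 4, 5, 13, -3]

def Spec_findFibSubset (arr : List Int) (out : List Int) : Prop := out = findFibSubset_alt arr
instance (arr : List Int) (out : List Int) : Decidable (Spec_findFibSubset arr out) := by unfold Spec_findFibSubset; infer_instance

-- ===== CLAIM (what is proved, stated in full; the proofs are below) =====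
def Claim_equal_findFibSubset : Prop := ∀ (arr : List Int), Dom_findFibSubset arr → Pre_findFibSubset arr → Spec_findFibSubset arr (findFibSubset arr)

-- ===== LEMMAS AND PROOFS =====

theorem fib_sum (k : Nat) : Nat.fib (k + 1 + 1) = Nat.fib k + Nat.fib (k + 1) := by
  rw [show k + 1 + 1 = k + 2 from rfl]
  exact Nat.fib_add_two

-- invariants of consecutive Fibonacci pairs
theorem fib_pair_inv (k : Nat) :
    Nat.fib k ≤ Nat.fib (k + 1) ∧ Nat.fib (k + 1) ≤ 2 * Nat.fib k + 1 ∧ 1 ≤ Nat.fib (k + 1) := by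
  refine ⟨Nat.fib_le_fib_succ, ?_, ?_⟩
  · cases k with
    | zero => decide
    | succ j =>
        have h := fib_sum j
        have hle : Nat.fib j ≤ Nat.fib (j + 1) := Nat.fib_le_fib_succ
        omega
  · have : 0 < Nat.fib (k + 1) := Nat.fib_pos.mpr (Nat.succ_pos k)
    omega

-- fib k is the first fib at index ≥ k equal to x, once x ≤ fib k
theorem fib_stop (x : Int) (k : Nat) (hxle : x ≤ (Nat.fib k : Int)) :
    (decide ((Nat.fib k : Int) = x) = true ↔ ∃ m, k ≤ m ∧ (Nat.fib m : Int) = x) := by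
  constructor
  · intro hd
    exact ⟨k, le_refl k, of_decide_eq_true hd⟩
  · rintro ⟨m, hkm, hfm⟩
    have hmono : (Nat.fib k : Int) ≤ (Nat.fib m : Int) := by
      exact_mod_cast Nat.fib_mono hkm
    exact decide_eq_true (by omega)

-- B's loop, started at the k-th Fibonacci pair with sufficient fuel, decides
-- "some fib at index ≥ k equals x"
theorem fibCheck_spec : ∀ (n : Nat) (x : Int) (k : Nat),
    4 * x.toNat - (2 * Nat.fib k + Nat.fib (k + 1)) ≤ n →
    (fibCheck n x (Nat.fib k) (Nat.fib (k + 1)) = true ↔ ∃ m, k ≤ m ∧ (Nat.fib m : Int) = x) := by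
  intro n
  induction n with
  | zero =>
      intro x k hn
      obtain ⟨i1, i2, i3⟩ := fib_pair_inv k
      exact fib_stop x k (by omega)
  | succ n ih =>
      intro x k hn
      obtain ⟨i1, i2, i3⟩ := fib_pair_inv k
      have hs := fib_sum k
      rw [fibCheck]
      split
      · next h1 =>
          rw [show Nat.fib k + Nat.fib (k + 1) = Nat.fib (k + 1 + 1) from (fib_sum k).symm]
          rw [ih x (k + 1) (by omega)]
          constructor
          · rintro ⟨m, hm, he⟩; exact ⟨m, by omega, he⟩
          · rintro ⟨m, hm, he⟩
            refine ⟨m, ?_, he⟩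
            rcases Nat.eq_or_lt_of_le hm with heq | hlt
            · exfalso; rw [← heq] at he; omega
            · omega
      · next h1 => exact fib_stop x k (by omega)

-- every element A's loop appends is a Fibonacci number
theorem buildFib_sound : ∀ (n : Nat) (maxVal : Int) (k : Nat) (y : Int),
    y ∈ buildFib n maxVal (Nat.fib k) (Nat.fib (k + 1)) → ∃ m, (Nat.fib m : Int) = y := by
  intro n
  induction n with
  | zero => intro maxVal k y hy; simp [buildFib] at hy
  | succ n ih =>
      intro maxVal k y hy
      rw [buildFib] at hy
      split at hy
      · rw [show Nat.fib k + Nat.fib (k + 1) = Nat.fib (k + 1 + 1) from (fib_sum k).symm] at hy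
        rcases List.mem_cons.mp hy with he | ht
        · exact ⟨k + 1 + 1, he.symm⟩
        · exact ih maxVal (k + 1) y ht
      · simp at hy

-- every Fibonacci number ≤ maxVal is in A's list, given sufficient fuel
theorem buildFib_complete : ∀ (n : Nat) (maxVal : Int) (k m : Nat),
    3 * maxVal.toNat - (Nat.fib k + 2 * Nat.fib (k + 1)) ≤ n →
    k ≤ m → (Nat.fib m : Int) ≤ maxVal →
    (Nat.fib m : Int) ∈ ((Nat.fib k : Int) :: (Nat.fib (k + 1) : Int) ::
      buildFib n maxVal (Nat.fib k) (Nat.fib (k + 1))) := by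
  intro n
  induction n with
  | zero =>
      intro maxVal k m hn hkm hle
      obtain ⟨i1, i2, i3⟩ := fib_pair_inv k
      rcases Nat.eq_or_lt_of_le hkm with heq | hlt
      · exact heq ▸ List.mem_cons_self ..
      · have hmono : (Nat.fib (k + 1) : Int) ≤ (Nat.fib m : Int) := by
          exact_mod_cast Nat.fib_mono hlt
        have hv : (Nat.fib m : Int) = (Nat.fib (k + 1) : Int) := by omega
        rw [hv]
        exact List.mem_cons_of_mem _ (List.mem_cons_self ..)
  | succ n ih =>
      intro maxVal k m hn hkm hle
      obtain ⟨i1, i2, i3⟩ := fib_pair_inv k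
      have hs := fib_sum k
      rcases Nat.eq_or_lt_of_le hkm with heq | hlt
      · exact heq ▸ List.mem_cons_self ..
      · by_cases hg : (Nat.fib (k + 1) : Int) < maxVal
        · -- guard true: unfold one step and recurse at k + 1
          rw [buildFib, if_pos hg]
          rw [show Nat.fib k + Nat.fib (k + 1) = Nat.fib (k + 1 + 1) from (fib_sum k).symm]
          have htail := ih maxVal (k + 1) m (by
              obtain ⟨j1, j2, j3⟩ := fib_pair_inv (k + 1)
              have hs2 := fib_sum (k + 1)
              omega) hlt hle
          rcases List.mem_cons.mp htail with he | ht
          · rw [he]; exact List.mem_cons_of_mem _ (List.mem_cons_self ..)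
          · exact List.mem_cons_of_mem _ (List.mem_cons_of_mem _ ht)
        · have hmono : (Nat.fib (k + 1) : Int) ≤ (Nat.fib m : Int) := by
            exact_mod_cast Nat.fib_mono hlt
          have hv : (Nat.fib m : Int) = (Nat.fib (k + 1) : Int) := by omega
          rw [hv]
          exact List.mem_cons_of_mem _ (List.mem_cons_self ..)

theorem build01 (n : Nat) (maxVal : Int) :
    buildFib n maxVal (Nat.fib 0) (Nat.fib (0 + 1)) = buildFib n maxVal 0 1 := by
  norm_num [Nat.fib_zero, Nat.fib_one]

-- pointwise: for x ≤ maxVal, A's membership test agrees with B's per-element walk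
theorem pred_agree (maxVal x : Int) (hx : x ≤ maxVal) :
    PySem.Set.contains (PySem.Set.ofList (0 :: 1 :: buildFib (3 * maxVal.toNat) maxVal 0 1)) x
      = (if x < 0 then false else fibCheck (4 * x.toNat) x 0 1) := by
  have hA : PySem.Set.contains
        (PySem.Set.ofList (0 :: 1 :: buildFib (3 * maxVal.toNat) maxVal 0 1)) x = true
      ↔ ∃ m, (Nat.fib m : Int) = x := by
    rw [PySem.Set.contains_iff, PySem.Set.mem_ofList]
    constructor
    · intro hmem
      rcases List.mem_cons.mp hmem with h0 | hmem
      · exact ⟨0, by simp [Nat.fib_zero, h0]⟩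
      rcases List.mem_cons.mp hmem with h1 | hmem
      · exact ⟨1, by simp [Nat.fib_one, h1]⟩
      · refine buildFib_sound (3 * maxVal.toNat) maxVal 0 x ?_
        rw [build01]; exact hmem
    · rintro ⟨m, hm⟩
      have hc := buildFib_complete (3 * maxVal.toNat) maxVal 0 m (Nat.sub_le _ _)
        (Nat.zero_le m) (hm ▸ hx)
      rw [build01, hm, Nat.fib_zero, Nat.fib_one] at hc
      norm_num at hc
      simp only [List.mem_cons]
      exact hc
  have hB : (if x < 0 then false else fibCheck (4 * x.toNat) x 0 1) = true
      ↔ ∃ m, (Nat.fib m : Int) = x := by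
    by_cases hneg : x < 0
    · rw [if_pos hneg]
      constructor
      · intro h; exact absurd h (by simp)
      · rintro ⟨m, hm⟩
        have : (0 : Int) ≤ (Nat.fib m : Int) := Int.natCast_nonneg _
        omega
    · rw [if_neg hneg]
      have hspec := fibCheck_spec (4 * x.toNat) x 0 (Nat.sub_le _ _)
      rw [Nat.fib_zero] at hspec
      rw [show Nat.fib (0 + 1) = 1 from Nat.fib_one] at hspec
      norm_num at hspec
      exact hspec
  by_cases hex : ∃ m, (Nat.fib m : Int) = x
  · rw [hA.mpr hex, hB.mpr hex]
  · have a' : ¬ PySem.Set.contains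
        (PySem.Set.ofList (0 :: 1 :: buildFib (3 * maxVal.toNat) maxVal 0 1)) x = true :=
      fun h => hex (hA.mp h)
    have b' : ¬ (if x < 0 then false else fibCheck (4 * x.toNat) x 0 1) = true :=
      fun h => hex (hB.mp h)
    rw [Bool.not_eq_true] at a' b'
    rw [a', b']

-- ===== VERDICT (by name: the statement is the Claim_ definition above) =====
theorem findFibSubset_spec : Claim_equal_findFibSubset := by
  intro arr _ hpre
  unfold Spec_findFibSubset findFibSubset findFibSubset_alt
  cases hmax : PySem.List.max? arr (fun x => x) with
  | none => exact absurd ((PySem.List.max?_eq_none_iff arr (fun x => x)).mp hmax) hpre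
  | some maxVal =>
      apply List.filter_congr
      intro x hx
      exact pred_agree maxVal x (PySem.List.max?_isMax hmax x hx)
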